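-- pv_equiv track=rewrite | github.com/Pyder3/TechFest_Tutor | BackEnd/question_generator.py | parse_test_cases
-- ===== SOURCE A (Python) =====
-- def parse_test_cases(test_case_response):
--     lines = test_case_response.split("\n")
--     test_cases = []
--     current_test_case = None
--     capturing_input = False
--     capturing_output = False
--     for line in lines:
--         if line.startswith("**Test Case No."):
--             if current_test_case:
--                 test_cases.append(current_test_case)
--             current_test_case = {"input": "", "output": ""}
--             capturing_input = True
--             capturing_output = False
--         elif line.startswith("**Expected Output"):
--             capturing_input = False
--             capturing_output = True
--         else:
--             if capturing_input:
--                 current_test_case["input"] += line.strip("`").strip()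
--             elif capturing_output:
--                 current_test_case["output"] += line.strip("`").strip()
--
--     if current_test_case:
--         test_cases.append(current_test_case)  # Append the last test case if it exists
--
--     return test_cases
-- ===== SOURCE B (Python) =====
-- def parse_test_cases(test_case_response):
--     lines = test_case_response.split("\n")
--     cases = []
--     i = 0
--     # skip everything before the first test-case marker
--     while i < len(lines) and not lines[i].startswith("**Test Case No."):
--         i += 1
--     while i < len(lines):
--         # lines[i] is a marker; its block runs until the next marker
--         j = i + 1
--         while j < len(lines) and not lines[j].startswith("**Test Case No."):
--             j += 1
--         block = lines[i + 1:j]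
--         before, after, seen = [], [], False
--         for line in block:
--             if line.startswith("**Expected Output"):
--                 seen = True
--             elif seen:
--                 after.append(line)
--             else:
--                 before.append(line)
--         cases.append({"input": "".join(l.strip("`").strip() for l in before),
--                       "output": "".join(l.strip("`").strip() for l in after)})
--         i = j
--     return cases
-- ===== Notes on version B (the rewrite author's own statement) =====
-- stated objective: alternative
-- what changed: A is a single-pass flag state machine mutating a current dict; B first splits the lines into test-case blocks by index scanning, then partitions each block at its first '**Expected Output' marker and joins the cleaned lines per field.
import Mathlib
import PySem

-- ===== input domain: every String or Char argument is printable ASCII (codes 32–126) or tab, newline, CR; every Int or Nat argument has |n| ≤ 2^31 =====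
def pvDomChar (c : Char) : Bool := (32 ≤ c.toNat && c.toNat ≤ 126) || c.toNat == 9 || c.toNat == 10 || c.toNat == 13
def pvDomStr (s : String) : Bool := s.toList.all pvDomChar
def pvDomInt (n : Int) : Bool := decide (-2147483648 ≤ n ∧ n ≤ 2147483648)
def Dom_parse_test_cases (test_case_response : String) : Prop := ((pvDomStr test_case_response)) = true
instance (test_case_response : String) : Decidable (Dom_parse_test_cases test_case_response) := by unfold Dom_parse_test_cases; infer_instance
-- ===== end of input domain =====

-- B replaces A's single-pass flag state machine by a block-splitting scan (markers first, then a per-block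
-- partition at the first expected-output marker); same cost, different decomposition ("alternative").


-- shared one-line helpers (both Pythons test the same marker prefixes and clean lines the same way);
-- lines and field values are handled as List Char (PySem.Chars), turned into String only in the output dicts
def pvLines (s : String) : List (List Char) := PySem.Chars.splitOn s.toList "\n".toList
def pvIsTC (l : List Char) : Bool := PySem.Chars.startswith l "**Test Case No.".toList
def pvIsEO (l : List Char) : Bool := PySem.Chars.startswith l "**Expected Output".toList
-- line.strip("`").strip()
def pvClean (l : List Char) : List Char := PySem.Chars.strip (PySem.Chars.stripChars l ['`'])
-- the dict {"input": i, "output": o} as an association list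
def pvToDict (p : List Char × List Char) : List (String × String) := [("input", String.ofList p.1), ("output", String.ofList p.2)]

-- ===== PORT A =====
-- A's loop: state = (test_cases, current_test_case, capturing_input, capturing_output);
-- 'none' is exactly Python's TypeError (subscripting current_test_case = None).
def pvRunA : List (List Char) → List (List Char × List Char) → Option (List Char × List Char) → Bool → Bool →
    Option (List (List Char × List Char))
  | [], tcs, cur, _, _ => some (match cur with | some c => tcs ++ [c] | none => tcs)
  | l :: ls, tcs, cur, ci, co =>
    if pvIsTC l then
      pvRunA ls (tcs ++ cur.toList) (some ([], [])) true false
    else if pvIsEO l then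
      pvRunA ls tcs cur false true
    else if ci then
      match cur with
      | some c => pvRunA ls tcs (some (c.1 ++ pvClean l, c.2)) ci co
      | none => none
    else if co then
      match cur with
      | some c => pvRunA ls tcs (some (c.1, c.2 ++ pvClean l)) ci co
      | none => none   -- Python: TypeError (excluded by Pre_)
    else
      pvRunA ls tcs cur ci co

def parse_test_cases (test_case_response : String) : List (List (String × String)) :=
  match pvRunA (pvLines test_case_response) [] none false false with
  | some tcs => tcs.map pvToDict
  | none => []   -- unreachable under Pre_ (Python raises TypeError there)

-- ===== PORT B =====
-- "".join(l.strip("`").strip() for l in lines)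
def pvJoinClean : List (List Char) → List Char
  | [] => []
  | l :: ls => pvClean l ++ pvJoinClean ls

-- B's per-block loop: partition at the first '**Expected Output' line, dropping marker lines
def pvParseBlock (block : List (List Char)) : List (String × String) :=
  let r := block.foldl
    (fun (acc : List (List Char) × List (List Char) × Bool) l =>
      if pvIsEO l then (acc.1, acc.2.1, true)
      else if acc.2.2 then (acc.1, acc.2.1 ++ [l], acc.2.2)
      else (acc.1 ++ [l], acc.2.1, acc.2.2))
    ([], [], false)
  [("input", String.ofList (pvJoinClean r.1)), ("output", String.ofList (pvJoinClean r.2.1))]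

-- B's outer while: lines[i] is a marker, the inner while finds j = next marker, block = lines[i+1:j], continue at j
def pvParseFrom : List (List Char) → List (List (String × String))
  | [] => []
  | _ :: ls =>
    pvParseBlock (ls.takeWhile (fun l => !pvIsTC l)) :: pvParseFrom (ls.dropWhile (fun l => !pvIsTC l))
  termination_by ls => ls.length
  decreasing_by exact Nat.lt_succ_of_le (List.length_dropWhile_le _ _)

def parse_test_cases_alt (test_case_response : String) : List (List (String × String)) :=
  -- first while loop: skip everything before the first test-case marker
  pvParseFrom ((pvLines test_case_response).dropWhile (fun l => !pvIsTC l))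

-- ===== PRECONDITION & SPEC =====
-- Pre_ excludes exactly the inputs on which A raises TypeError: some non-marker line follows an
-- '**Expected Output' line before the first '**Test Case No.' marker.
def Pre_parse_test_cases (test_case_response : String) : Prop :=
  ((((pvLines test_case_response).takeWhile (fun l => !pvIsTC l)).dropWhile
      (fun l => !pvIsEO l)).all pvIsEO) = true
instance (test_case_response : String) : Decidable (Pre_parse_test_cases test_case_response) := by
  unfold Pre_parse_test_cases; infer_instance

def pvWitness_parse_test_cases : String := "**Test Case No. 1\n`ab`\n**Expected Output:\n cd \n"

def Spec_parse_test_cases (test_case_response : String) (out : List (List (String × String))) : Prop :=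
  out = parse_test_cases_alt test_case_response
instance (test_case_response : String) (out : List (List (String × String))) :
    Decidable (Spec_parse_test_cases test_case_response out) := by
  unfold Spec_parse_test_cases; infer_instance

-- ===== CLAIM (what is proved, stated in full; the proofs are below) =====
def Claim_equal_parse_test_cases : Prop :=
  ∀ (test_case_response : String), Dom_parse_test_cases test_case_response →
    Pre_parse_test_cases test_case_response →
    Spec_parse_test_cases test_case_response (parse_test_cases test_case_response)

-- ===== LEMMAS AND PROOFS =====

-- proof-side pair-level picture of B: lines of a block before/after its first expected-output marker
def pvSplitB : List (List Char) → Bool → List (List Char) × List (List Char)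
  | [], _ => ([], [])
  | l :: ls, seen =>
    if pvIsEO l then pvSplitB ls true
    else if seen then ((pvSplitB ls seen).1, l :: (pvSplitB ls seen).2)
    else (l :: (pvSplitB ls seen).1, (pvSplitB ls seen).2)

-- pair-level result of B from an open block boundary
def pvPairs : List (List Char) → List (List Char × List Char)
  | [] => []
  | _ :: ls =>
    (pvJoinClean (pvSplitB (ls.takeWhile (fun l => !pvIsTC l)) false).1,
     pvJoinClean (pvSplitB (ls.takeWhile (fun l => !pvIsTC l)) false).2) ::
      pvPairs (ls.dropWhile (fun l => !pvIsTC l))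
  termination_by ls => ls.length
  decreasing_by exact Nat.lt_succ_of_le (List.length_dropWhile_le _ _)

theorem pvFold_splitB (block : List (List Char)) : ∀ bef aft (seen : Bool),
    ((block.foldl
      (fun (acc : List (List Char) × List (List Char) × Bool) l =>
        if pvIsEO l then (acc.1, acc.2.1, true)
        else if acc.2.2 then (acc.1, acc.2.1 ++ [l], acc.2.2)
        else (acc.1 ++ [l], acc.2.1, acc.2.2))
      (bef, aft, seen)).1 = bef ++ (pvSplitB block seen).1) ∧
    ((block.foldl
      (fun (acc : List (List Char) × List (List Char) × Bool) l =>
        if pvIsEO l then (acc.1, acc.2.1, true)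
        else if acc.2.2 then (acc.1, acc.2.1 ++ [l], acc.2.2)
        else (acc.1 ++ [l], acc.2.1, acc.2.2))
      (bef, aft, seen)).2.1 = aft ++ (pvSplitB block seen).2) := by
  induction block with
  | nil => intro bef aft seen; simp [pvSplitB]
  | cons l ls ih =>
    intro bef aft seen
    by_cases hEO : pvIsEO l
    · simpa [List.foldl_cons, hEO, pvSplitB] using ih bef aft true
    · cases seen with
      | true => simpa [List.foldl_cons, hEO, pvSplitB] using ih bef (aft ++ [l]) true
      | false => simpa [List.foldl_cons, hEO, pvSplitB] using ih (bef ++ [l]) aft false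

theorem pvParseBlock_eq (block : List (List Char)) :
    pvParseBlock block = pvToDict
      (pvJoinClean (pvSplitB block false).1, pvJoinClean (pvSplitB block false).2) := by
  have h := pvFold_splitB block [] [] false
  simp only [pvParseBlock, pvToDict]
  rw [h.1, h.2]
  simp

theorem pvParseFrom_eq (ls : List (List Char)) : pvParseFrom ls = (pvPairs ls).map pvToDict := by
  induction ls using pvParseFrom.induct with
  | case1 => simp [pvParseFrom, pvPairs]
  | case2 l ls ih =>
    rw [pvParseFrom, pvPairs]
    simp [pvParseBlock_eq, ih]

theorem pvRunA_inBlock (ls : List (List Char)) : ∀ (tcs : List (List Char × List Char)) i o (seen : Bool),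
    pvRunA ls tcs (some (i, o)) (!seen) seen =
    some (tcs ++
      (i ++ pvJoinClean (pvSplitB (ls.takeWhile (fun l => !pvIsTC l)) seen).1,
       o ++ pvJoinClean (pvSplitB (ls.takeWhile (fun l => !pvIsTC l)) seen).2) ::
        pvPairs (ls.dropWhile (fun l => !pvIsTC l))) := by
  induction ls with
  | nil => intro tcs i o seen; simp [pvRunA, pvSplitB, pvJoinClean, pvPairs]
  | cons l ls ih =>
    intro tcs i o seen
    by_cases hTC : pvIsTC l
    · rw [pvRunA]
      simp only [hTC, if_true, Option.toList_some]
      rw [show (true : Bool) = !false from rfl, ih (tcs ++ [(i, o)]) [] [] false]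
      rw [List.takeWhile_cons, List.dropWhile_cons]
      simp [hTC, pvSplitB, pvJoinClean, pvPairs]
    · by_cases hEO : pvIsEO l
      · rw [pvRunA]
        simp only [hTC, hEO, if_true]
        rw [show (false : Bool) = !true from rfl, ih tcs i o true]
        rw [List.takeWhile_cons, List.dropWhile_cons]
        simp [hTC, hEO, pvSplitB]
      · cases seen with
        | false =>
          have h := ih tcs (i ++ pvClean l) o false
          simp only [Bool.not_false] at h
          rw [pvRunA, List.takeWhile_cons, List.dropWhile_cons]
          simp [hTC, hEO, pvSplitB, pvJoinClean, h, List.append_assoc]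
        | true =>
          have h := ih tcs i (o ++ pvClean l) true
          simp only [Bool.not_true] at h
          rw [pvRunA, List.takeWhile_cons, List.dropWhile_cons]
          simp [hTC, hEO, pvSplitB, pvJoinClean, h, List.append_assoc]

-- prefix invariant: co = false needs Pre_'s condition, co = true needs every remaining prefix line to be a marker
def pvPrefOK (ls : List (List Char)) (co : Bool) : Bool :=
  if co then (ls.takeWhile (fun l => !pvIsTC l)).all pvIsEO
  else (((ls.takeWhile (fun l => !pvIsTC l)).dropWhile (fun l => !pvIsEO l)).all pvIsEO)

theorem pvRunA_prefix (ls : List (List Char)) : ∀ (co : Bool), pvPrefOK ls co = true →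
    pvRunA ls [] none false co = some (pvPairs (ls.dropWhile (fun l => !pvIsTC l))) := by
  induction ls with
  | nil => intro co _; simp [pvRunA, pvPairs]
  | cons l ls ih =>
    intro co hok
    by_cases hTC : pvIsTC l
    · rw [pvRunA]
      simp only [hTC, if_true, Option.toList_none, List.append_nil]
      rw [show (true : Bool) = !false from rfl, pvRunA_inBlock ls [] [] [] false]
      rw [List.dropWhile_cons]
      simp [hTC, pvPairs]
    · by_cases hEO : pvIsEO l
      · -- an '**Expected Output' line in the prefix: switch to co = true
        have htw : ((l :: ls).takeWhile (fun l' => !pvIsTC l')).all pvIsEO = true := by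
          cases co with
          | true => exact hok
          | false =>
            have hok' : (((l :: ls).takeWhile (fun l' => !pvIsTC l')).dropWhile
                (fun l' => !pvIsEO l')).all pvIsEO = true := hok
            rw [List.takeWhile_cons, if_pos (by simp [hTC]),
              List.dropWhile_cons, if_neg (by simp [hEO])] at hok'
            rw [List.takeWhile_cons, if_pos (by simp [hTC])]
            exact hok'
        rw [List.takeWhile_cons, if_pos (by simp [hTC]), List.all_cons, Bool.and_eq_true] at htw
        rw [pvRunA]
        simp only [hTC, hEO, if_true]
        rw [List.dropWhile_cons]
        simp only [hTC, Bool.not_false, if_true]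
        exact ih true htw.2
      · -- an ordinary line in the prefix
        cases co with
        | true =>
          exfalso
          have hok' : ((l :: ls).takeWhile (fun l' => !pvIsTC l')).all pvIsEO = true := hok
          rw [List.takeWhile_cons, if_pos (by simp [hTC]), List.all_cons,
            Bool.and_eq_true] at hok'
          exact hEO hok'.1
        | false =>
          have hok' : (((l :: ls).takeWhile (fun l' => !pvIsTC l')).dropWhile
              (fun l' => !pvIsEO l')).all pvIsEO = true := hok
          rw [List.takeWhile_cons, if_pos (by simp [hTC]),
            List.dropWhile_cons, if_pos (by simp [hEO])] at hok'
          rw [pvRunA]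
          simp only [hTC, hEO]
          rw [List.dropWhile_cons]
          simp only [hTC, Bool.not_false, if_true]
          exact ih false hok'

-- ===== VERDICT (by name: the statement is the Claim_ definition above) =====
theorem parse_test_cases_spec : Claim_equal_parse_test_cases := by
  intro s _ hpre
  unfold Spec_parse_test_cases parse_test_cases parse_test_cases_alt
  have h : pvPrefOK (pvLines s) false = true := hpre
  rw [pvRunA_prefix (pvLines s) false h, pvParseFrom_eq]
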